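-- pv_equiv track=rewrite | github.com/dionathan-santos/brochure | modules/extractor.py | pages_to_text
-- ===== SOURCE A (Python) =====
-- _PAGE_SEPARATOR = "\n--- PAGE {n} ---\n"
--
-- _MAX_CHARS_PER_PDF = 30_000
--
-- def pages_to_text(pages: list) -> str:
--     """Join per-page strings with the standard separator.
--
--     Stops adding pages once the total reaches _MAX_CHARS_PER_PDF so the LLM
--     receives a bounded, predictable input size regardless of PDF length.
--     """
--     parts = []
--     total_chars = 0
--     for n, page_text in enumerate(pages, start=1):
--         block = _PAGE_SEPARATOR.format(n=n) + page_text
--         if total_chars + len(block) > _MAX_CHARS_PER_PDF: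
--             remaining = len(pages) - n + 1
--             parts.append(
--                 f"\n[... {remaining} page(s) omitted — character limit reached]"
--             )
--             break
--         parts.append(block)
--         total_chars += len(block)
--     return "".join(parts)
-- ===== SOURCE B (Python) =====
-- _PAGE_SEPARATOR = "\n--- PAGE {n} ---\n"
--
-- _MAX_CHARS_PER_PDF = 30_000
--
-- def pages_to_text(pages: list) -> str:
--     """Table-based rewrite: build all blocks, take a prefix-sum of their
--     lengths, find the first cumulative total that exceeds the limit, join
--     the blocks before that cutoff and report how many pages were omitted."""
--     blocks = [_PAGE_SEPARATOR.format(n=i + 1) + p for i, p in enumerate(pages)]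
--     cums = []
--     t = 0
--     for b in blocks:
--         t += len(b)
--         cums.append(t)
--     cut = next((i for i, c in enumerate(cums) if c > _MAX_CHARS_PER_PDF), len(blocks))
--     out = "".join(blocks[:cut])
--     if cut < len(pages):
--         out += f"\n[... {len(pages) - cut} page(s) omitted — character limit reached]"
--     return out
-- ===== Notes on version B (the rewrite author's own statement) =====
-- stated objective: alternative
-- what changed: Replaces A's single accumulate-and-break loop over pages with a table-based pipeline: build the full list of blocks, compute a prefix-sum table of their lengths, locate the first cumulative total exceeding the limit, then join the kept prefix and append the omission message from the cutoff index. (B builds the whole table, so unlike A it does not stop early at the limit).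
import Mathlib
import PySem

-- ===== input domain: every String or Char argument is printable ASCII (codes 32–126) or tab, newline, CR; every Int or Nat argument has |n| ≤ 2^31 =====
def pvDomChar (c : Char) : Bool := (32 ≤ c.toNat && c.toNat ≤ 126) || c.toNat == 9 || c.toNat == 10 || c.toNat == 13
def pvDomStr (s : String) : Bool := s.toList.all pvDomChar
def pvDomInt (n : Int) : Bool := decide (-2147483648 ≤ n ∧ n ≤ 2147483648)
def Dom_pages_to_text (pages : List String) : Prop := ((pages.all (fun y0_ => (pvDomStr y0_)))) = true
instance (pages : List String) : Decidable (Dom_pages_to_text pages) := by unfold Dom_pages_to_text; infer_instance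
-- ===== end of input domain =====

-- B rebuilds A's accumulate-and-break loop as blocks + prefix-sum table + cutoff search (alternative decomposition, same cost).


-- ===== PORT A =====
-- _PAGE_SEPARATOR.format(n=n) + page_text
def pvSep (n : Int) (page : String) : String := "\n--- PAGE " ++ PySem.Int.toStr n ++ " ---\n" ++ page

-- the omission message f"\n[... {r} page(s) omitted — character limit reached]"
def pvMsg (r : Int) : String := "\n[... " ++ PySem.Int.toStr r ++ " page(s) omitted — character limit reached]"

-- the 'for n, page_text in enumerate(pages, start=1): …' loop of A, with its break
def pagesLoop (pages rest : List String) (n total : Int) (parts : List String) : List String :=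
  match rest with
  | [] => parts
  | p :: tl =>
      let block := pvSep n p
      if total + (PySem.Str.len block : Int) > 30000 then
        parts ++ [pvMsg ((pages.length : Int) - n + 1)]
      else
        pagesLoop pages tl (n + 1) (total + (PySem.Str.len block : Int)) (parts ++ [block])

def pages_to_text (pages : List String) : String :=
  PySem.Str.join "" (pagesLoop pages pages 1 0 [])

-- ===== PORT B =====
-- blocks = [_PAGE_SEPARATOR.format(n=i+1) + p for i, p in enumerate(pages)]
def pvBlocks (pages : List String) : List String :=
  (PySem.List.enumerate pages 0).map (fun ip => pvSep (ip.1 + 1) ip.2)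

-- the prefix-sum table loop: 'for b in blocks: t += len(b); cums.append(t)'
def pvScan (t : Int) : List String → List Int
  | [] => []
  | b :: tl => (t + (PySem.Str.len b : Int)) :: pvScan (t + (PySem.Str.len b : Int)) tl

-- cut = next((i for i, c in enumerate(cums) if c > _MAX_CHARS_PER_PDF), len(blocks))
def pvFindCut (i : Nat) : List Int → Nat
  | [] => i
  | c :: tl => if c > 30000 then i else pvFindCut (i + 1) tl

def pages_to_text_alt (pages : List String) : String :=
  let blocks := pvBlocks pages
  let cut := pvFindCut 0 (pvScan 0 blocks)
  let out := PySem.Str.join "" (blocks.take cut)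
  if cut < pages.length then out ++ pvMsg ((pages.length : Int) - (cut : Int)) else out

-- ===== PRECONDITION & SPEC =====
def Spec_pages_to_text (pages : List String) (out : String) : Prop := out = pages_to_text_alt pages
instance (pages : List String) (out : String) : Decidable (Spec_pages_to_text pages out) := by unfold Spec_pages_to_text; infer_instance

-- ===== CLAIM (what is proved, stated in full; the proofs are below) =====
def Claim_equal_pages_to_text : Prop := ∀ (pages : List String), Dom_pages_to_text pages → Spec_pages_to_text pages (pages_to_text pages)

-- ===== LEMMAS AND PROOFS =====

-- B's blocks list, renumbered from an arbitrary starting page number (proof-side view of pvBlocks)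
def pvBlocksFrom (n : Int) : List String → List String
  | [] => []
  | p :: tl => pvSep n p :: pvBlocksFrom (n + 1) tl

theorem pvBlocks_eq_from (pages : List String) :
    ∀ (s : Int), (PySem.List.enumerate pages s).map (fun ip => pvSep (ip.1 + 1) ip.2)
      = pvBlocksFrom (s + 1) pages := by
  induction pages with
  | nil => intro s; simp [PySem.List.enumerate_nil, pvBlocksFrom]
  | cons p tl ih =>
      intro s
      simp only [PySem.List.enumerate_cons, List.map_cons, pvBlocksFrom, ih (s + 1)]

theorem pvFindCut_shift (l : List Int) : ∀ (i : Nat), pvFindCut i l = i + pvFindCut 0 l := by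
  induction l with
  | nil => intro i; simp [pvFindCut]
  | cons c tl ih =>
      intro i
      have e : ∀ (j : Nat), pvFindCut j (c :: tl) = if c > 30000 then j else pvFindCut (j + 1) tl :=
        fun j => rfl
      rw [e i, e 0]
      by_cases h : c > 30000
      · simp [h]
      · simp only [if_neg h, ih (i + 1), ih 1]
        omega

theorem pagesLoop_eq (pages : List String) :
    ∀ (rest : List String) (n total : Int) (parts : List String),
      (pages.length : Int) - n + 1 = rest.length →
      pagesLoop pages rest n total parts =
        parts ++ (pvBlocksFrom n rest).take (pvFindCut 0 (pvScan total (pvBlocksFrom n rest)))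
          ++ (if pvFindCut 0 (pvScan total (pvBlocksFrom n rest)) < rest.length then
                [pvMsg ((rest.length : Int) - (pvFindCut 0 (pvScan total (pvBlocksFrom n rest)) : Int))]
              else []) := by
  intro rest
  induction rest with
  | nil => intro n total parts _; simp [pagesLoop, pvBlocksFrom, pvScan, pvFindCut]
  | cons p tl ih =>
      intro n total parts h
      simp only [pagesLoop, pvBlocksFrom, pvScan]
      by_cases hb : total + (PySem.Str.len (pvSep n p) : Int) > 30000
      · rw [if_pos hb]
        have hc : pvFindCut 0 ((total + (PySem.Str.len (pvSep n p) : Int))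
            :: pvScan (total + (PySem.Str.len (pvSep n p) : Int)) (pvBlocksFrom (n + 1) tl)) = 0 := by
          simp only [pvFindCut, if_pos hb]
        rw [hc]
        have hm : (pages.length : Int) - n + 1 = ((p :: tl).length : Int) := by
          simpa using h
        simp [hm]
      · rw [if_neg hb]
        have hc : pvFindCut 0 ((total + (PySem.Str.len (pvSep n p) : Int))
            :: pvScan (total + (PySem.Str.len (pvSep n p) : Int)) (pvBlocksFrom (n + 1) tl))
            = 1 + pvFindCut 0 (pvScan (total + (PySem.Str.len (pvSep n p) : Int)) (pvBlocksFrom (n + 1) tl)) := by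
          simp only [pvFindCut, if_neg hb]
          exact pvFindCut_shift _ 1
        rw [hc]
        rw [ih (n + 1) (total + (PySem.Str.len (pvSep n p) : Int)) (parts ++ [pvSep n p]) (by simp only [List.length_cons] at h; push_cast at h ⊢; omega)]
        set k := pvFindCut 0 (pvScan (total + (PySem.Str.len (pvSep n p) : Int)) (pvBlocksFrom (n + 1) tl)) with hk
        have htake : (pvSep n p :: pvBlocksFrom (n + 1) tl).take (1 + k)
            = pvSep n p :: (pvBlocksFrom (n + 1) tl).take k := by
          rw [Nat.add_comm]; simp [List.take_succ_cons]
        rw [htake]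
        by_cases hlt : k < tl.length
        · rw [if_pos hlt, if_pos (show 1 + k < (p :: tl).length by simp only [List.length_cons]; omega)]
          have hmsg : ((p :: tl).length : Int) - ((1 + k : Nat) : Int) = (tl.length : Int) - (k : Int) := by
            simp only [List.length_cons]; push_cast; omega
          rw [hmsg]; simp
        · rw [if_neg hlt, if_neg (show ¬ 1 + k < (p :: tl).length by simp only [List.length_cons]; omega)]
          simp

-- "".join distributes over appending a final element / the empty tail
theorem pvJoin_append_singleton (l : List String) (m : String) :
    PySem.Str.join "" (l ++ [m]) = PySem.Str.join "" l ++ m := by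
  apply String.ext
  simp only [PySem.Str.toList_join, List.map_append, List.map_cons, List.map_nil, String.toList_append]
  induction l with
  | nil => simp [PySem.Chars.join, List.intercalate]
  | cons a tl ih =>
      cases tl with
      | nil => simp [PySem.Chars.join, List.intercalate]
      | cons b tl' => simpa [PySem.Chars.join_cons_cons, List.append_assoc] using ih

-- ===== VERDICT (by name: the statement is the Claim_ definition above) =====
theorem pages_to_text_spec : Claim_equal_pages_to_text := by
  intro pages _
  unfold Spec_pages_to_text pages_to_text pages_to_text_alt
  have hb : pvBlocks pages = pvBlocksFrom 1 pages := by
    simpa using pvBlocks_eq_from pages 0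
  rw [pagesLoop_eq pages pages 1 0 [] (by omega)]
  rw [hb]
  set k := pvFindCut 0 (pvScan 0 (pvBlocksFrom 1 pages)) with hk
  by_cases hlt : k < pages.length
  · rw [if_pos hlt, if_pos hlt]
    simp only [List.nil_append]
    exact pvJoin_append_singleton _ _
  · rw [if_neg hlt, if_neg hlt]
    simp [hk]
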